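-- pv_equiv track=rewrite | github.com/drizztSun/common_project | PythonLeetcode/Leetcode/1147_LongestChunkedPalindromeDecomposition.py | doit_dp_dfs
-- ===== SOURCE A (Python) =====
-- def doit_dp_dfs(text: str) -> int:
--     def solve(i,j):
--         ans = 0
--         for k in range(i+1,j+1):
--             if i == j-k+i and k == j:
--                 return 1
--             elif text[i:k] == text[j-k+i:j]:
--                 return 2 + solve(k,j-k+i)
--         return ans
--     return solve(0,len(text))
-- ===== SOURCE B (Python) =====
-- def doit_dp_dfs(text: str) -> int:
--     res = 0
--     l, r = 0, len(text)
--     size = 1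
--     while l + size <= r - size:
--         if text[l:l + size] == text[r - size:r]:
--             res += 2
--             l += size
--             r -= size
--             size = 1
--         else:
--             size += 1
--     if l < r:
--         res += 1
--     return res
-- ===== Notes on version B (the rewrite author's own statement) =====
-- stated objective: faster
-- what changed: Replaced the recursive solver that re-scans every chunk length up to the whole remaining interval (including overlapping and full-length chunks) by an iterative two-pointer greedy loop that only tests chunk sizes up to the midpoint and keeps a running counter instead of recursing.
import Mathlib
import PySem

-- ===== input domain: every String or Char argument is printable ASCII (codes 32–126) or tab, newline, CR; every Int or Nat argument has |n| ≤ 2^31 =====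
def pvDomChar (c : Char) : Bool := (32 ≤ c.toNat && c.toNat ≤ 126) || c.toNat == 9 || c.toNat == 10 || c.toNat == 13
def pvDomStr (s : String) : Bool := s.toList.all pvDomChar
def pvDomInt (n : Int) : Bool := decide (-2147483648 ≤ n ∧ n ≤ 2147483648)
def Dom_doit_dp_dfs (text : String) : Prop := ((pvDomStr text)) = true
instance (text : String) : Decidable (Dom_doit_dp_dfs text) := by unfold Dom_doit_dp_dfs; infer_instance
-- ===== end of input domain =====

-- B replaces A's recursive solver (which re-scans chunk lengths up to the whole
-- remaining interval) by an iterative two-pointer greedy loop testing sizes only up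
-- to the midpoint, with a running counter; objective: faster (constant-factor).

-- ===== PORT A =====
-- the 'for k in range(i+1, j+1)' body with early returns; 'rec' is the recursive call 'solve'
def pvInnerA (t : List Char) (i j : Int) (rec : Int → Int → Int) : List Int → Int
  | [] => 0
  | k :: rest =>
      if i = j - k + i ∧ k = j then 1
      else if PySem.List.slice t (some i) (some k) = PySem.List.slice t (some (j - k + i)) (some j) then
        2 + rec k (j - k + i)
      else pvInnerA t i j rec rest

-- 'solve(i, j)'; fuel bounds the recursion depth (text.length + 1 always suffices: each
-- recursive call shrinks the interval, see pvSolveA_fuel below)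
def pvSolveA (t : List Char) : Nat → Int → Int → Int
  | 0, _, _ => 0
  | f + 1, i, j => pvInnerA t i j (pvSolveA t f) (PySem.List.pyRange (i + 1) (j + 1) 1)

def doit_dp_dfs (text : String) : Int :=
  pvSolveA text.toList (text.toList.length + 1) 0 (text.toList.length : Int)

-- ===== PORT B =====
-- the 'while l + size <= r - size' loop of Source B, with accumulator res
def pvLoopB (t : List Char) (res l r : Int) (size : Nat) : Int :=
  if _h : l + (size : Int) ≤ r - (size : Int) then
    if PySem.List.slice t (some l) (some (l + (size : Int))) =
        PySem.List.slice t (some (r - (size : Int))) (some r) then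
      pvLoopB t (res + 2) (l + (size : Int)) (r - (size : Int)) 1
    else
      pvLoopB t res l r (size + 1)
  else if l < r then res + 1 else res
  termination_by (3 * (r - l) - 2 * (size : Int) + 2).toNat
  decreasing_by
  · omega
  · omega

def doit_dp_dfs_alt (text : String) : Int :=
  pvLoopB text.toList 0 0 (text.toList.length : Int) 1

-- ===== PRECONDITION & SPEC =====
def Spec_doit_dp_dfs (text : String) (out : Int) : Prop := out = doit_dp_dfs_alt text
instance (text : String) (out : Int) : Decidable (Spec_doit_dp_dfs text out) := by unfold Spec_doit_dp_dfs; infer_instance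

-- ===== CLAIM (what is proved, stated in full; the proofs are below) =====
def Claim_equal_doit_dp_dfs : Prop := ∀ (text : String), Dom_doit_dp_dfs text → Spec_doit_dp_dfs text (doit_dp_dfs text)

-- ===== LEMMAS AND PROOFS =====

-- 'text[l:l+c] == text[r-c:r]' — the chunk test both programs perform, indices as Nats
def pvMtch (t : List Char) (l r c : Nat) : Prop :=
  PySem.List.slice t (some (l : Int)) (some ((l : Int) + (c : Int))) =
    PySem.List.slice t (some ((r : Int) - (c : Int))) (some (r : Int))

lemma pvDropTakeEq (t : List Char) (a b c : Nat) :
    ((t.drop a).take c = (t.drop b).take c ↔ ∀ m, m < c → t[a+m]? = t[b+m]?) := by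
  constructor
  · intro h m hm
    have h2 := congrArg (fun xs => xs[m]?) h
    simpa [List.getElem?_drop, hm] using h2
  · intro h
    apply List.ext_getElem?
    intro m
    by_cases hm : m < c
    · simp [List.getElem?_drop, hm, h m hm]
    · simp [hm]

lemma pvMtch_iff (t : List Char) (l r c : Nat) (h1 : l + c ≤ r) :
    pvMtch t l r c ↔ ∀ m, m < c → t[l+m]? = t[(r-c)+m]? := by
  unfold pvMtch
  have e1 : (l : Int) + (c : Int) = ((l + c : Nat) : Int) := by push_cast; ring
  have e2 : (r : Int) - (c : Int) = ((r - c : Nat) : Int) := by omega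
  rw [e1, e2, PySem.List.slice_natCast, PySem.List.slice_natCast]
  have e3 : l + c - l = c := by omega
  have e4 : r - (r - c) = c := by omega
  rw [e3, e4]
  exact pvDropTakeEq t l (r - c) c

-- the border-descent lemma: an overlapping matching chunk yields a non-overlapping one
lemma pvBorder (t : List Char) :
    ∀ c l r : Nat, 1 ≤ c → l + c < r →
      (∀ m, m < c → t[l+m]? = t[(r-c)+m]?) →
      ∃ c', 1 ≤ c' ∧ l + 2*c' ≤ r ∧ (∀ m, m < c' → t[l+m]? = t[(r-c')+m]?) := by
  intro c
  induction c using Nat.strong_induction_on with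
  | _ c ih =>
    intro l r h1 h2 hpw
    by_cases hov : l + 2*c ≤ r
    · exact ⟨c, h1, hov, hpw⟩
    · have hp1 : 1 ≤ r - l - c := by omega
      have hpc : r - l - c < c := by omega
      have hrc : r - c = l + (r - l - c) := by omega
      apply ih (c - (r - l - c)) (by omega) l r (by omega) (by omega)
      intro m hm
      have ha : t[l+m]? = t[l + (r - l - c) + m]? := by
        have h := hpw m (by omega)
        rwa [hrc] at h
      have hb : t[l + (r - l - c) + m]? = t[l + (r - l - c) + ((r - l - c) + m)]? := by
        have h := hpw ((r - l - c) + m) (by omega)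
        rw [hrc] at h
        have e : l + ((r - l - c) + m) = l + (r - l - c) + m := by omega
        rwa [e] at h
      have e2 : (r - (c - (r - l - c))) + m = l + (r - l - c) + ((r - l - c) + m) := by omega
      rw [e2]
      exact ha.trans hb

lemma pvNoBig (t : List Char) (l r : Nat)
    (hall : ∀ L, 1 ≤ L → l + 2*L ≤ r → ¬ pvMtch t l r L) :
    ∀ L, 1 ≤ L → l + L < r → ¬ pvMtch t l r L := by
  intro L h1 h2 hm
  rw [pvMtch_iff t l r L (by omega)] at hm
  obtain ⟨c', hc1, hc2, hpw⟩ := pvBorder t L l r h1 h2 hm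
  exact hall c' hc1 hc2 ((pvMtch_iff t l r c' (by omega)).mpr hpw)

-- when no chunk matches, A's scan runs through to k = j and returns 1
lemma pvWalk1 (t : List Char) :
    ∀ (q k l r : Nat) (rec : Int → Int → Int), k + q = r → l < k →
      (∀ L, 1 ≤ L → l + L < r → ¬ pvMtch t l r L) →
      pvInnerA t (l : Int) (r : Int) rec (PySem.List.pyRange (k : Int) ((r : Int) + 1) 1) = 1 := by
  intro q
  induction q with
  | zero =>
    intro k l r rec hk hlk hno
    have hkr : k = r := by omega
    subst hkr
    rw [PySem.List.pyRange_one_cons (by omega : (k : Int) < (k : Int) + 1)]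
    simp [pvInnerA]
  | succ q ihq =>
    intro k l r rec hk hlk hno
    have hkr : k < r := by omega
    rw [PySem.List.pyRange_one_cons (by omega : (k : Int) < (r : Int) + 1)]
    simp only [pvInnerA]
    rw [if_neg (by rintro ⟨-, h2⟩; omega)]
    have hcond : ¬ (PySem.List.slice t (some (l : Int)) (some (k : Int)) =
        PySem.List.slice t (some ((r : Int) - (k : Int) + (l : Int))) (some (r : Int))) := by
      have h := hno (k - l) (by omega) (by omega)
      unfold pvMtch at h
      have e1 : (l : Int) + ((k - l : Nat) : Int) = (k : Int) := by omega
      have e2 : (r : Int) - ((k - l : Nat) : Int) = (r : Int) - (k : Int) + (l : Int) := by omega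
      rwa [e1, e2] at h
    rw [if_neg hcond]
    have e3 : (k : Int) + 1 = ((k + 1 : Nat) : Int) := by push_cast; ring
    rw [e3]
    exact ihq (k + 1) l r rec (by omega) (by omega) hno

-- the joint scan: B's while-loop at size c versus A's for-loop from k = l+c
lemma pvInner (t : List Char) :
    ∀ (m c l r : Nat) (f : Nat) (res : Int),
      (∀ (l' r' : Nat) (res' : Int), r' - l' < r - l → l' ≤ r' → r' ≤ t.length → r' - l' < f →
          pvLoopB t res' (l' : Int) (r' : Int) 1 = res' + pvSolveA t f (l' : Int) (r' : Int)) →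
      1 ≤ c → c + m = (r - l) + 1 → l ≤ r → r ≤ t.length → r - l ≤ f + 1 →
      (c = 1 ∨ 2*(c-1) ≤ r - l) →
      (∀ L, 1 ≤ L → L < c → ¬ pvMtch t l r L) →
      pvLoopB t res (l : Int) (r : Int) c =
        res + pvInnerA t (l : Int) (r : Int) (pvSolveA t f)
          (PySem.List.pyRange ((l : Int) + (c : Int)) ((r : Int) + 1) 1) := by
  intro m
  induction m with
  | zero =>
    intro c l r f res OIH hc hsum hlr hrn hfe hprev hno
    have hlr' : l = r := by omega
    subst hlr'
    have hc1 : c = 1 := by omega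
    subst hc1
    rw [pvLoopB, dif_neg (by push_cast; omega)]
    rw [if_neg (by omega : ¬ ((l : Int) < (l : Int)))]
    rw [PySem.List.pyRange_one_eq_nil (by push_cast; omega)]
    simp [pvInnerA]
  | succ m ihm =>
    intro c l r f res OIH hc hsum hlr hrn hfe hprev hno
    have hcd : c ≤ r - l := by omega
    have hlr1 : l < r := by omega
    by_cases hg : 2*c ≤ r - l
    · rw [pvLoopB, dif_pos (by omega)]
      rw [PySem.List.pyRange_one_cons (by omega : (l : Int) + (c : Int) < (r : Int) + 1)]
      simp only [pvInnerA]
      have e2 : (r : Int) - ((l : Int) + (c : Int)) + (l : Int) = (r : Int) - (c : Int) := by ring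
      rw [e2]
      rw [if_neg (show ¬ ((l : Int) = (r : Int) - (c : Int) ∧ (l : Int) + (c : Int) = (r : Int)) from
        by rintro ⟨-, h2⟩; omega)]
      by_cases hmm : PySem.List.slice t (some (l : Int)) (some ((l : Int) + (c : Int))) =
          PySem.List.slice t (some ((r : Int) - (c : Int))) (some (r : Int))
      · rw [if_pos hmm, if_pos hmm]
        have e3 : (l : Int) + (c : Int) = ((l + c : Nat) : Int) := by push_cast; ring
        have e4 : (r : Int) - (c : Int) = ((r - c : Nat) : Int) := by omega
        rw [e3, e4]
        rw [OIH (l + c) (r - c) (res + 2) (by omega) (by omega) (by omega) (by omega)]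
        ring
      · rw [if_neg hmm, if_neg hmm]
        have e5 : (l : Int) + (c : Int) + 1 = (l : Int) + ((c + 1 : Nat) : Int) := by push_cast; ring
        rw [e5]
        apply ihm (c + 1) l r f res OIH (by omega) (by omega) hlr hrn hfe (Or.inr (by omega))
        intro L h1 h2
        by_cases hLc : L < c
        · exact hno L h1 hLc
        · have hLe : L = c := by omega
          subst hLe
          exact hmm
    · rw [pvLoopB, dif_neg (by omega)]
      rw [if_pos (by omega : (l : Int) < (r : Int))]
      have hall : ∀ L, 1 ≤ L → l + 2*L ≤ r → ¬ pvMtch t l r L := by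
        intro L h1 h2
        exact hno L h1 (by omega)
      have e6 : (l : Int) + (c : Int) = ((l + c : Nat) : Int) := by push_cast; ring
      rw [e6, pvWalk1 t (r - (l + c)) (l + c) l r (pvSolveA t f) (by omega) (by omega)
        (pvNoBig t l r hall)]

lemma pvMain (t : List Char) :
    ∀ (d l r : Nat) (f : Nat) (res : Int), r - l ≤ d → l ≤ r → r ≤ t.length → r - l < f →
      pvLoopB t res (l : Int) (r : Int) 1 = res + pvSolveA t f (l : Int) (r : Int) := by
  intro d
  induction d using Nat.strong_induction_on with
  | _ d ih =>
    intro l r f res hd hlr hrn hf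
    cases f with
    | zero => omega
    | succ f' =>
      simp only [pvSolveA]
      have e : (l : Int) + 1 = (l : Int) + ((1 : Nat) : Int) := by norm_num
      rw [e]
      apply pvInner t (r - l) 1 l r f' res ?_ (le_refl 1) (by omega) hlr hrn (by omega) (Or.inl rfl)
        (by intro L h1 h2; omega)
      intro l' r' res' h1 h2 h3 h4
      exact ih (r' - l') (by omega) l' r' f' res' (le_refl _) h2 h3 h4

-- ===== VERDICT (by name: the statement is the Claim_ definition above) =====
theorem doit_dp_dfs_spec : Claim_equal_doit_dp_dfs := by
  intro text _
  unfold Spec_doit_dp_dfs doit_dp_dfs doit_dp_dfs_alt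
  have h := pvMain text.toList (text.toList.length) 0 (text.toList.length)
    (text.toList.length + 1) 0 (by omega) (by omega) (le_refl _) (by omega)
  simpa using h.symm
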